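-- pv_equiv track=rewrite | github.com/pathim/advent_of_code_2020 | 4/main.py | check_with_values
-- ===== SOURCE A (Python) =====
-- def check(s):
-- 	needed=["byr","iyr","eyr","hgt","hcl","ecl","pid"]
-- 	found=[x in s for x in needed]
-- 	return all(found)
--
-- def check_with_values(s):
-- 	if not check(s): return False
-- 	try:
-- 		if not 1920<=int(s['byr'])<=2002: return False
-- 		if not 2010<=int(s['iyr'])<=2020: return False
-- 		if not 2020<=int(s['eyr'])<=2030: return False
-- 		if s['hgt'][-2:]=="cm":
-- 			if not 150<=int(s['hgt'][:-2])<=193: return False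
-- 		elif s['hgt'][-2:]=="in":
-- 			if not 59<=int(s['hgt'][:-2])<=76: return False
-- 		else:
-- 			return False
-- 		if s['hcl'][0]!='#': return False
-- 		if len(s['hcl'])!=7: return False
-- 		if not all(x in '0123456789abcdef' for x in s['hcl'][1:]): return False
-- 		if not s['ecl'] in ["amb","blu", "brn","gry","grn","hzl","oth"]: return False
-- 		if not len(s['pid'])==9: return False
-- 		if not all(x in '0123456789' for x in s['pid']): return False
-- 		return True
-- 	except:
-- 		return False
-- ===== SOURCE B (Python) =====
-- FIELDS = ("byr", "iyr", "eyr", "hgt", "hcl", "ecl", "pid")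
--
-- def _field_ok(k, v):
--     """True/False if k is a passport field and v is (in)valid for it, None if k is not a field."""
--     if k in ("byr", "iyr", "eyr"):
--         lo, hi = {"byr": (1920, 2002), "iyr": (2010, 2020), "eyr": (2020, 2030)}[k]
--         return lo <= int(v) <= hi
--     if k == "hgt":
--         rng = {"cm": (150, 193), "in": (59, 76)}.get(v[-2:])
--         return rng is not None and rng[0] <= int(v[:-2]) <= rng[1]
--     if k == "hcl":
--         return len(v) == 7 and v[0] == '#' and all(c in "0123456789abcdef" for c in v[1:])
--     if k == "ecl":
--         return v in ("amb", "blu", "brn", "gry", "grn", "hzl", "oth")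
--     if k == "pid":
--         return len(v) == 9 and all(c in "0123456789" for c in v)
--     return None
--
-- def check_with_values(s):
--     # single pass over the dict items: fail fast on any invalid field,
--     # collect the valid required fields, then demand all seven were seen
--     try:
--         valid = set()
--         for k, v in s.items():
--             ok = _field_ok(k, v)
--             if ok is None:
--                 continue
--             if not ok:
--                 return False
--             valid.add(k)
--         return valid >= set(FIELDS)
--     except Exception:
--         return False
-- ===== Notes on version B (the rewrite author's own statement) =====
-- stated objective: alternative
-- what changed: Replaces A's presence pre-check plus seven keyed lookups validated in a fixed sequence by a single pass over the dict's items that dispatches each (key, value) pair to its field rule, fails fast on an invalid field, accumulates the set of validated required fields and finally tests that set for covering all seven.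
import Mathlib
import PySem

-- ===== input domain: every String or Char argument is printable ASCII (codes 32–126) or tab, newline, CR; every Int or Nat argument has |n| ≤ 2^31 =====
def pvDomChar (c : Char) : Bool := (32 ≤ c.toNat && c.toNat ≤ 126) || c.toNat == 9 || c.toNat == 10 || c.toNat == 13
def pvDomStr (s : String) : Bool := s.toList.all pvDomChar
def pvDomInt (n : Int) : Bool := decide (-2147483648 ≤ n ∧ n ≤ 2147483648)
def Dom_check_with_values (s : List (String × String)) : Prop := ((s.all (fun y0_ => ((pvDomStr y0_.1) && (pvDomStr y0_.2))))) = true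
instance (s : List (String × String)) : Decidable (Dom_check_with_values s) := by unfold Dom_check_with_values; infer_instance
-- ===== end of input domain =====

set_option maxHeartbeats 1000000


-- B replaces A's presence pre-check plus seven keyed lookups checked in a fixed sequence
-- by ONE pass over the dict's items, dispatching each pair to its field rule, failing fast
-- on an invalid field and finally testing the collected set of valid required fields
-- for covering all seven (alternative decomposition; return value only).

-- ===== PORT A =====
-- A: check(s) — all seven needed keys present
def pvCheck (s : List (String × String)) : Bool :=
  let needed : List String := ["byr", "iyr", "eyr", "hgt", "hcl", "ecl", "pid"]
  let found := needed.map (fun x => (PySem.Dict.mk s).contains x)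
  found.all (fun b => b)

-- A: the try-block body, each early `return False` a some false, each exception a none
-- (caught by the bare except → False); the code after the hgt if/elif/else is the shared
-- fall-through continuation, so it appears once per successful branch.
def pvBody (s : List (String × String)) : Option Bool :=
  ((PySem.Dict.mk s).get? "byr").bind fun byr =>
  (PySem.Int.ofStr? byr).bind fun byrN =>
  if ¬ (1920 ≤ byrN ∧ byrN ≤ 2002) then some false else
  ((PySem.Dict.mk s).get? "iyr").bind fun iyr =>
  (PySem.Int.ofStr? iyr).bind fun iyrN =>
  if ¬ (2010 ≤ iyrN ∧ iyrN ≤ 2020) then some false else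
  ((PySem.Dict.mk s).get? "eyr").bind fun eyr =>
  (PySem.Int.ofStr? eyr).bind fun eyrN =>
  if ¬ (2020 ≤ eyrN ∧ eyrN ≤ 2030) then some false else
  ((PySem.Dict.mk s).get? "hgt").bind fun hgt =>
  if PySem.Str.slice hgt (some (-2)) none == "cm" then
    (PySem.Int.ofStr? (PySem.Str.slice hgt none (some (-2)))).bind fun n =>
    if ¬ (150 ≤ n ∧ n ≤ 193) then some false else
    ((PySem.Dict.mk s).get? "hcl").bind fun hcl =>
  (PySem.Str.pyGet? hcl 0).bind fun c0 =>
  if c0 ≠ '#' then some false else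
  if hcl.toList.length ≠ 7 then some false else
  if ¬ ((PySem.Str.slice hcl (some 1) none).toList.all
        (fun x => "0123456789abcdef".toList.contains x)) then some false else
  ((PySem.Dict.mk s).get? "ecl").bind fun ecl =>
  if ¬ (["amb", "blu", "brn", "gry", "grn", "hzl", "oth"].contains ecl) then some false else
  ((PySem.Dict.mk s).get? "pid").bind fun pid =>
  if ¬ (pid.toList.length = 9) then some false else
  if ¬ (pid.toList.all (fun x => "0123456789".toList.contains x)) then some false else
  some true
  else if PySem.Str.slice hgt (some (-2)) none == "in" then
    (PySem.Int.ofStr? (PySem.Str.slice hgt none (some (-2)))).bind fun n =>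
    if ¬ (59 ≤ n ∧ n ≤ 76) then some false else
    ((PySem.Dict.mk s).get? "hcl").bind fun hcl =>
  (PySem.Str.pyGet? hcl 0).bind fun c0 =>
  if c0 ≠ '#' then some false else
  if hcl.toList.length ≠ 7 then some false else
  if ¬ ((PySem.Str.slice hcl (some 1) none).toList.all
        (fun x => "0123456789abcdef".toList.contains x)) then some false else
  ((PySem.Dict.mk s).get? "ecl").bind fun ecl =>
  if ¬ (["amb", "blu", "brn", "gry", "grn", "hzl", "oth"].contains ecl) then some false else
  ((PySem.Dict.mk s).get? "pid").bind fun pid =>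
  if ¬ (pid.toList.length = 9) then some false else
  if ¬ (pid.toList.all (fun x => "0123456789".toList.contains x)) then some false else
  some true
  else some false

def check_with_values (s : List (String × String)) : Bool :=
  if ¬ pvCheck s then false
  else
    match pvBody s with
    | some b => b
    | none => false

-- ===== PORT B =====
def pvFields : List String := ["byr", "iyr", "eyr", "hgt", "hcl", "ecl", "pid"]

def pvYears : PySem.Dict String (Int × Int) :=
  PySem.Dict.mk [("byr", (1920, 2002)), ("iyr", (2010, 2020)), ("eyr", (2020, 2030))]

def pvHgtRanges : PySem.Dict String (Int × Int) :=
  PySem.Dict.mk [("cm", (150, 193)), ("in", (59, 76))]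

-- B: _field_ok(k, v); outer none = an exception propagating to the caller's try,
-- some none = Python's None (k is not a passport field), some (some b) = the bool b.
-- (In the hcl branch Python's v[0] is guarded by `len(v) == 7 and`, so it never raises;
-- the unguarded Lean `PySem.Str.pyGet? v 0 == some '#'` is false exactly when the guard
-- already made the conjunction false, so the branch is total and exact.)
def pvFieldCheck (k : String) (v : String) : Option (Option Bool) :=
  if ["byr", "iyr", "eyr"].contains k then
    match pvYears.get? k with
    | none => none   -- KeyError (unreachable: guarded by the membership test)
    | some (lo, hi) => (PySem.Int.ofStr? v).map (fun n => some (lo ≤ n && n ≤ hi))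
  else if k == "hgt" then
    match pvHgtRanges.get? (PySem.Str.slice v (some (-2)) none) with
    | none => some (some false)   -- rng is None
    | some (lo, hi) =>
        (PySem.Int.ofStr? (PySem.Str.slice v none (some (-2)))).map
          (fun n => some (lo ≤ n && n ≤ hi))
  else if k == "hcl" then
    some (some (v.toList.length == 7 && PySem.Str.pyGet? v 0 == some '#' &&
      (PySem.Str.slice v (some 1) none).toList.all
        (fun x => "0123456789abcdef".toList.contains x)))
  else if k == "ecl" then
    some (some (["amb", "blu", "brn", "gry", "grn", "hzl", "oth"].contains v))
  else if k == "pid" then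
    some (some (v.toList.length == 9 &&
      v.toList.all (fun x => "0123456789".toList.contains x)))
  else some none

-- B: the for-loop over s.items() with the `valid` set accumulator; outer none = the
-- exception reaching the except-clause, some b = `return b`.
def pvLoop (items : List (String × String)) (valid : PySem.Set String) : Option Bool :=
  match items with
  | [] => some (PySem.Set.issuperset valid (PySem.Set.ofList pvFields))
  | (k, v) :: rest =>
      match pvFieldCheck k v with
      | none => none
      | some none => pvLoop rest valid
      | some (some ok) => if ok then pvLoop rest (PySem.Set.add valid k) else some false

def check_with_values_alt (s : List (String × String)) : Bool :=
  match pvLoop s PySem.Set.empty with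
  | some b => b
  | none => false

-- ===== PRECONDITION & SPEC =====
-- Pre_ states the Python dict invariant: an association list standing for a dict has
-- pairwise-distinct keys (a Python dict cannot hold a key twice, so no dict input is
-- excluded); on duplicate-keyed lists A reads only the first binding of a key while B
-- scans every binding, and neither behaviour comes from Python.
def Pre_check_with_values (s : List (String × String)) : Prop :=
  (s.map Prod.fst).Nodup
instance (s : List (String × String)) : Decidable (Pre_check_with_values s) := by
  unfold Pre_check_with_values; infer_instance

def pvWitness_check_with_values : (List (String × String)) :=
  [("byr", "1980"), ("iyr", "2015"), ("eyr", "2025"), ("hgt", "180cm"),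
   ("hcl", "#1a2b3c"), ("ecl", "amb"), ("pid", "123456789")]

def Spec_check_with_values (s : List (String × String)) (out : Bool) : Prop := out = check_with_values_alt s
instance (s : List (String × String)) (out : Bool) : Decidable (Spec_check_with_values s out) := by unfold Spec_check_with_values; infer_instance

-- ===== CLAIM (what is proved, stated in full; the proofs are below) =====
def Claim_equal_check_with_values : Prop := ∀ (s : List (String × String)), Dom_check_with_values s → Pre_check_with_values s → Spec_check_with_values s (check_with_values s)

-- ===== LEMMAS AND PROOFS =====

-- proof-side decomposition of A: one Option-valued validator per field (none = exception)
def pvVByr (v : String) : Option Bool :=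
  (PySem.Int.ofStr? v).bind fun n => some (1920 ≤ n && n ≤ 2002)

def pvVIyr (v : String) : Option Bool :=
  (PySem.Int.ofStr? v).bind fun n => some (2010 ≤ n && n ≤ 2020)

def pvVEyr (v : String) : Option Bool :=
  (PySem.Int.ofStr? v).bind fun n => some (2020 ≤ n && n ≤ 2030)

def pvVHgt (v : String) : Option Bool :=
  if PySem.Str.slice v (some (-2)) none == "cm" then
    (PySem.Int.ofStr? (PySem.Str.slice v none (some (-2)))).bind fun n =>
    some (150 ≤ n && n ≤ 193)
  else if PySem.Str.slice v (some (-2)) none == "in" then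
    (PySem.Int.ofStr? (PySem.Str.slice v none (some (-2)))).bind fun n =>
    some (59 ≤ n && n ≤ 76)
  else
    some false

def pvVHcl (v : String) : Option Bool :=
  (PySem.Str.pyGet? v 0).bind fun c =>
  some (c == '#' && v.toList.length == 7 &&
    (PySem.Str.slice v (some 1) none).toList.all
      (fun x => "0123456789abcdef".toList.contains x))

def pvVEcl (v : String) : Option Bool :=
  some (["amb", "blu", "brn", "gry", "grn", "hzl", "oth"].contains v)

def pvVPid (v : String) : Option Bool :=
  some (v.toList.length == 9 && v.toList.all (fun x => "0123456789".toList.contains x))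

def pvValidators : List (String × (String → Option Bool)) :=
  [("byr", pvVByr), ("iyr", pvVIyr), ("eyr", pvVEyr), ("hgt", pvVHgt),
   ("hcl", pvVHcl), ("ecl", pvVEcl), ("pid", pvVPid)]

def pvAllValid (s : List (String × String)) :
    List (String × (String → Option Bool)) → Option Bool
  | [] => some true
  | (f, p) :: rest =>
      ((PySem.Dict.mk s).get? f).bind fun v =>
      (p v).bind fun b =>
      if b then pvAllValid s rest else some false

theorem pv_some_bind {a b : Type} (x : a) (f : a → Option b) :
    (some x).bind f = f x := rfl

theorem pv_none_bind {a b : Type} (f : a → Option b) :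
    (none : Option a).bind f = none := rfl

theorem pv_if_true {α : Type} (a b : α) : (if (true : Bool) then a else b) = a := rfl

theorem pv_if_false {α : Type} (a b : α) : (if (false : Bool) then a else b) = b := rfl

theorem pv_range_true {lo hi n : Int} (h1 : lo ≤ n) (h2 : n ≤ hi) :
    (lo ≤ n && n ≤ hi) = true := by simp [h1, h2]

theorem pv_range_false {lo hi n : Int} (h : ¬ (lo ≤ n ∧ n ≤ hi)) :
    (lo ≤ n && n ≤ hi) = false := by
  rcases not_and_or.mp h with h' | h' <;> simp [h']

-- per-field step lemmas: A's early-return block = the validator then short-circuit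
theorem pv_byr_step (v : String) (rest : Option Bool) :
    ((PySem.Int.ofStr? v).bind fun n =>
      if ¬ (1920 ≤ n ∧ n ≤ 2002) then some false else rest)
    = (pvVByr v).bind fun b => if b then rest else some false := by
  unfold pvVByr
  rw [Option.bind_assoc]
  cases PySem.Int.ofStr? v with
  | none => rfl
  | some n =>
    simp only [pv_some_bind]
    by_cases c : 1920 ≤ n ∧ n ≤ 2002
    · rw [if_neg (not_not_intro c), pv_range_true c.1 c.2, pv_if_true]
    · rw [if_pos c, pv_range_false c, pv_if_false]

theorem pv_iyr_step (v : String) (rest : Option Bool) :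
    ((PySem.Int.ofStr? v).bind fun n =>
      if ¬ (2010 ≤ n ∧ n ≤ 2020) then some false else rest)
    = (pvVIyr v).bind fun b => if b then rest else some false := by
  unfold pvVIyr
  rw [Option.bind_assoc]
  cases PySem.Int.ofStr? v with
  | none => rfl
  | some n =>
    simp only [pv_some_bind]
    by_cases c : 2010 ≤ n ∧ n ≤ 2020
    · rw [if_neg (not_not_intro c), pv_range_true c.1 c.2, pv_if_true]
    · rw [if_pos c, pv_range_false c, pv_if_false]

theorem pv_eyr_step (v : String) (rest : Option Bool) :
    ((PySem.Int.ofStr? v).bind fun n =>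
      if ¬ (2020 ≤ n ∧ n ≤ 2030) then some false else rest)
    = (pvVEyr v).bind fun b => if b then rest else some false := by
  unfold pvVEyr
  rw [Option.bind_assoc]
  cases PySem.Int.ofStr? v with
  | none => rfl
  | some n =>
    simp only [pv_some_bind]
    by_cases c : 2020 ≤ n ∧ n ≤ 2030
    · rw [if_neg (not_not_intro c), pv_range_true c.1 c.2, pv_if_true]
    · rw [if_pos c, pv_range_false c, pv_if_false]

theorem pv_hgt_step (v : String) (rest : Option Bool) :
    (if PySem.Str.slice v (some (-2)) none == "cm" then
      (PySem.Int.ofStr? (PySem.Str.slice v none (some (-2)))).bind fun n =>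
      if ¬ (150 ≤ n ∧ n ≤ 193) then some false else rest
    else if PySem.Str.slice v (some (-2)) none == "in" then
      (PySem.Int.ofStr? (PySem.Str.slice v none (some (-2)))).bind fun n =>
      if ¬ (59 ≤ n ∧ n ≤ 76) then some false else rest
    else some false)
    = (pvVHgt v).bind fun b => if b then rest else some false := by
  unfold pvVHgt
  by_cases hcm : PySem.Str.slice v (some (-2)) none = "cm"
  · simp only [beq_iff_eq.mpr hcm, if_true]
    rw [Option.bind_assoc]
    cases PySem.Int.ofStr? (PySem.Str.slice v none (some (-2))) with
    | none => rfl
    | some n =>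
      simp only [pv_some_bind]
      by_cases c : 150 ≤ n ∧ n ≤ 193
      · rw [if_neg (not_not_intro c), pv_range_true c.1 c.2, pv_if_true]
      · rw [if_pos c, pv_range_false c, pv_if_false]
  · simp only [beq_eq_false_iff_ne.mpr hcm, pv_if_false]
    by_cases hin : PySem.Str.slice v (some (-2)) none = "in"
    · simp only [beq_iff_eq.mpr hin, if_true]
      rw [Option.bind_assoc]
      cases PySem.Int.ofStr? (PySem.Str.slice v none (some (-2))) with
      | none => rfl
      | some n =>
        simp only [pv_some_bind]
        by_cases c : 59 ≤ n ∧ n ≤ 76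
        · rw [if_neg (not_not_intro c), pv_range_true c.1 c.2, pv_if_true]
        · rw [if_pos c, pv_range_false c, pv_if_false]
    · simp only [beq_eq_false_iff_ne.mpr hin, pv_if_false, pv_some_bind]

theorem pv_hcl_step (v : String) (rest : Option Bool) :
    ((PySem.Str.pyGet? v 0).bind fun c0 =>
      if c0 ≠ '#' then some false else
      if v.toList.length ≠ 7 then some false else
      if ¬ ((PySem.Str.slice v (some 1) none).toList.all
            (fun x => "0123456789abcdef".toList.contains x)) then some false else
      rest)
    = (pvVHcl v).bind fun b => if b then rest else some false := by
  unfold pvVHcl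
  rw [Option.bind_assoc]
  cases PySem.Str.pyGet? v 0 with
  | none => rfl
  | some c =>
    simp only [pv_some_bind]
    by_cases h1 : c = '#'
    · rw [if_neg (not_not_intro h1), beq_iff_eq.mpr h1, Bool.true_and]
      by_cases h2 : v.toList.length = 7
      · rw [if_neg (not_not_intro h2), beq_iff_eq.mpr h2, Bool.true_and]
        cases h3 : (PySem.Str.slice v (some 1) none).toList.all
            (fun x => "0123456789abcdef".toList.contains x) with
        | false => rw [if_pos Bool.false_ne_true, pv_if_false]
        | true => rw [if_neg (not_not_intro rfl), pv_if_true]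
      · rw [if_pos h2, beq_eq_false_iff_ne.mpr h2, Bool.false_and, pv_if_false]
    · rw [if_pos h1, beq_eq_false_iff_ne.mpr h1, Bool.false_and, Bool.false_and, pv_if_false]

theorem pv_ecl_step (v : String) (rest : Option Bool) :
    (if ¬ (["amb", "blu", "brn", "gry", "grn", "hzl", "oth"].contains v) then some false
     else rest)
    = (pvVEcl v).bind fun b => if b then rest else some false := by
  unfold pvVEcl
  simp only [pv_some_bind]
  cases h : ["amb", "blu", "brn", "gry", "grn", "hzl", "oth"].contains v with
  | false => rw [if_pos Bool.false_ne_true, pv_if_false]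
  | true => rw [if_neg (not_not_intro rfl), pv_if_true]

theorem pv_pid_step (v : String) (rest : Option Bool) :
    (if ¬ (v.toList.length = 9) then some false else
     if ¬ (v.toList.all (fun x => "0123456789".toList.contains x)) then some false else
     rest)
    = (pvVPid v).bind fun b => if b then rest else some false := by
  unfold pvVPid
  simp only [pv_some_bind]
  by_cases h5 : v.toList.length = 9
  · rw [if_neg (not_not_intro h5), beq_iff_eq.mpr h5, Bool.true_and]
    cases h6 : v.toList.all (fun x => "0123456789".toList.contains x) with
    | false => rw [if_pos Bool.false_ne_true, pv_if_false]
    | true => rw [if_neg (not_not_intro rfl), pv_if_true]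
  · rw [if_pos h5, beq_eq_false_iff_ne.mpr h5, Bool.false_and, pv_if_false]

-- A's fall-through code after the hgt check equals the last three validator entries
theorem pv_tail_eq (s : List (String × String)) :
    (((PySem.Dict.mk s).get? "hcl").bind fun hcl =>
  (PySem.Str.pyGet? hcl 0).bind fun c0 =>
  if c0 ≠ '#' then some false else
  if hcl.toList.length ≠ 7 then some false else
  if ¬ ((PySem.Str.slice hcl (some 1) none).toList.all
        (fun x => "0123456789abcdef".toList.contains x)) then some false else
  ((PySem.Dict.mk s).get? "ecl").bind fun ecl =>
  if ¬ (["amb", "blu", "brn", "gry", "grn", "hzl", "oth"].contains ecl) then some false else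
  ((PySem.Dict.mk s).get? "pid").bind fun pid =>
  if ¬ (pid.toList.length = 9) then some false else
  if ¬ (pid.toList.all (fun x => "0123456789".toList.contains x)) then some false else
  some true)
    = pvAllValid s [("hcl", pvVHcl), ("ecl", pvVEcl), ("pid", pvVPid)] := by
  simp only [pvAllValid]
  refine congrArg _ (funext fun v => ?_)
  rw [pv_hcl_step]
  refine congrArg _ (funext fun b => ?_)
  cases b
  · rfl
  · simp only [if_true]
    refine congrArg _ (funext fun e => ?_)
    rw [pv_ecl_step]
    refine congrArg _ (funext fun b2 => ?_)
    cases b2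
    · rfl
    · simp only [if_true]
      refine congrArg _ (funext fun p => ?_)
      rw [pv_pid_step]

-- if A's fall-through code returns True, the last three keys are present
theorem pv_tail_some (s : List (String × String))
    (h : (((PySem.Dict.mk s).get? "hcl").bind fun hcl =>
  (PySem.Str.pyGet? hcl 0).bind fun c0 =>
  if c0 ≠ '#' then some false else
  if hcl.toList.length ≠ 7 then some false else
  if ¬ ((PySem.Str.slice hcl (some 1) none).toList.all
        (fun x => "0123456789abcdef".toList.contains x)) then some false else
  ((PySem.Dict.mk s).get? "ecl").bind fun ecl =>
  if ¬ (["amb", "blu", "brn", "gry", "grn", "hzl", "oth"].contains ecl) then some false else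
  ((PySem.Dict.mk s).get? "pid").bind fun pid =>
  if ¬ (pid.toList.length = 9) then some false else
  if ¬ (pid.toList.all (fun x => "0123456789".toList.contains x)) then some false else
  some true)
      = some true) :
    ((PySem.Dict.mk s).get? "hcl").isSome = true ∧
      ((PySem.Dict.mk s).get? "ecl").isSome = true ∧
      ((PySem.Dict.mk s).get? "pid").isSome = true := by
  cases hv : (PySem.Dict.mk s).get? "hcl" with
  | none => rw [hv, pv_none_bind] at h; simp at h
  | some v =>
  rw [hv, pv_some_bind] at h
  cases hc : PySem.Str.pyGet? v 0 with
  | none => rw [hc, pv_none_bind] at h; simp at h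
  | some c =>
  rw [hc, pv_some_bind] at h
  by_cases h1 : c = '#'
  case neg => rw [if_pos h1] at h; simp at h
  rw [if_neg (not_not_intro h1)] at h
  by_cases h2 : v.toList.length = 7
  case neg => rw [if_pos h2] at h; simp at h
  rw [if_neg (not_not_intro h2)] at h
  cases h3 : (PySem.Str.slice v (some 1) none).toList.all
      (fun x => "0123456789abcdef".toList.contains x) with
  | false => rw [h3, if_pos Bool.false_ne_true] at h; simp at h
  | true =>
  rw [h3, if_neg (not_not_intro rfl)] at h
  cases he : (PySem.Dict.mk s).get? "ecl" with
  | none => rw [he, pv_none_bind] at h; simp at h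
  | some e =>
  rw [he, pv_some_bind] at h
  cases h4 : ["amb", "blu", "brn", "gry", "grn", "hzl", "oth"].contains e with
  | false => rw [h4, if_pos Bool.false_ne_true] at h; simp at h
  | true =>
  rw [h4, if_neg (not_not_intro rfl)] at h
  cases hp : (PySem.Dict.mk s).get? "pid" with
  | none => rw [hp, pv_none_bind] at h; simp at h
  | some p => simp

theorem pv_body_eq (s : List (String × String)) :
    pvBody s = pvAllValid s pvValidators := by
  unfold pvBody
  simp only [pv_tail_eq]
  simp only [pvValidators, pvAllValid]
  refine congrArg _ (funext fun byr => ?_)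
  rw [pv_byr_step]
  refine congrArg _ (funext fun b => ?_)
  cases b
  · rfl
  · simp only [if_true]
    refine congrArg _ (funext fun iyr => ?_)
    rw [pv_iyr_step]
    refine congrArg _ (funext fun b2 => ?_)
    cases b2
    · rfl
    · simp only [if_true]
      refine congrArg _ (funext fun eyr => ?_)
      rw [pv_eyr_step]
      refine congrArg _ (funext fun b3 => ?_)
      cases b3
      · rfl
      · simp only [if_true]
        refine congrArg _ (funext fun hgt => ?_)
        rw [pv_hgt_step]

-- if A's try-body returns True, all seven keys are present, i.e. check(s) holds
theorem pv_check_of_body (s : List (String × String)) (h : pvBody s = some true) :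
    pvCheck s = true := by
  unfold pvBody at h
  cases hb : (PySem.Dict.mk s).get? "byr" with
  | none => rw [hb, pv_none_bind] at h; simp at h
  | some byr =>
  rw [hb, pv_some_bind] at h
  cases hn1 : PySem.Int.ofStr? byr with
  | none => rw [hn1, pv_none_bind] at h; simp at h
  | some n1 =>
  rw [hn1, pv_some_bind] at h
  by_cases c1 : 1920 ≤ n1 ∧ n1 ≤ 2002
  case neg => rw [if_pos c1] at h; simp at h
  rw [if_neg (not_not_intro c1)] at h
  cases hi : (PySem.Dict.mk s).get? "iyr" with
  | none => rw [hi, pv_none_bind] at h; simp at h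
  | some iyr =>
  rw [hi, pv_some_bind] at h
  cases hn2 : PySem.Int.ofStr? iyr with
  | none => rw [hn2, pv_none_bind] at h; simp at h
  | some n2 =>
  rw [hn2, pv_some_bind] at h
  by_cases c2 : 2010 ≤ n2 ∧ n2 ≤ 2020
  case neg => rw [if_pos c2] at h; simp at h
  rw [if_neg (not_not_intro c2)] at h
  cases he : (PySem.Dict.mk s).get? "eyr" with
  | none => rw [he, pv_none_bind] at h; simp at h
  | some eyr =>
  rw [he, pv_some_bind] at h
  cases hn3 : PySem.Int.ofStr? eyr with
  | none => rw [hn3, pv_none_bind] at h; simp at h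
  | some n3 =>
  rw [hn3, pv_some_bind] at h
  by_cases c3 : 2020 ≤ n3 ∧ n3 ≤ 2030
  case neg => rw [if_pos c3] at h; simp at h
  rw [if_neg (not_not_intro c3)] at h
  cases hh : (PySem.Dict.mk s).get? "hgt" with
  | none => rw [hh, pv_none_bind] at h; simp at h
  | some hgt =>
  rw [hh, pv_some_bind] at h
  have htail : ((PySem.Dict.mk s).get? "hcl").isSome = true ∧
      ((PySem.Dict.mk s).get? "ecl").isSome = true ∧
      ((PySem.Dict.mk s).get? "pid").isSome = true := by
    by_cases hcm : PySem.Str.slice hgt (some (-2)) none = "cm"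
    · simp only [beq_iff_eq.mpr hcm, if_true] at h
      cases hn4 : PySem.Int.ofStr? (PySem.Str.slice hgt none (some (-2))) with
      | none => rw [hn4, pv_none_bind] at h; simp at h
      | some n4 =>
        rw [hn4, pv_some_bind] at h
        by_cases c4 : 150 ≤ n4 ∧ n4 ≤ 193
        case neg => rw [if_pos c4] at h; simp at h
        rw [if_neg (not_not_intro c4)] at h
        exact pv_tail_some s h
    · simp only [beq_eq_false_iff_ne.mpr hcm, pv_if_false] at h
      by_cases hin : PySem.Str.slice hgt (some (-2)) none = "in"
      · simp only [beq_iff_eq.mpr hin, if_true] at h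
        cases hn4 : PySem.Int.ofStr? (PySem.Str.slice hgt none (some (-2))) with
        | none => rw [hn4, pv_none_bind] at h; simp at h
        | some n4 =>
          rw [hn4, pv_some_bind] at h
          by_cases c4 : 59 ≤ n4 ∧ n4 ≤ 76
          case neg => rw [if_pos c4] at h; simp at h
          rw [if_neg (not_not_intro c4)] at h
          exact pv_tail_some s h
      · simp only [beq_eq_false_iff_ne.mpr hin, pv_if_false] at h
        simp at h
  obtain ⟨t1, t2, t3⟩ := htail
  unfold pvCheck
  simp only [List.map_cons, List.map_nil, List.all_cons, List.all_nil,
    PySem.Dict.contains_eq_isSome_get?, hb, hi, he, hh, t1, t2, t3,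
    Option.isSome_some, Bool.and_self]

-- A equals the sequential sweep over the validator table
theorem pv_seq (s : List (String × String)) :
    check_with_values s
      = (match pvAllValid s pvValidators with | some b => b | none => false) := by
  unfold check_with_values
  rw [← pv_body_eq]
  by_cases hc : pvCheck s = true
  · rw [hc, if_neg (not_not_intro rfl)]
  · rw [if_pos hc]
    cases hb : pvBody s with
    | none => rfl
    | some b =>
      cases b with
      | false => rfl
      | true => exact absurd (pv_check_of_body s hb) hc

-- characterisation of the sequential sweep
theorem pv_allValid_iff (s : List (String × String))
    (ps : List (String × (String → Option Bool))) :
    pvAllValid s ps = some true ↔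
      ∀ p ∈ ps, ∃ v, (PySem.Dict.mk s).get? p.1 = some v ∧ p.2 v = some true := by
  induction ps with
  | nil => simp [pvAllValid]
  | cons hd tl ih =>
    obtain ⟨f, p⟩ := hd
    simp only [pvAllValid, List.forall_mem_cons]
    cases hg : (PySem.Dict.mk s).get? f with
    | none => simp
    | some v =>
      simp only [Option.bind_some, Option.some.injEq, exists_eq_left']
      cases hp : p v with
      | none => simp
      | some b =>
        cases b with
        | false => simp
        | true => simp [ih]

-- a passport field's rule never returns Python's None
theorem pv_fieldCheck_ne_some_none (f : String) (hf : f ∈ pvFields) (v : String) :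
    pvFieldCheck f v ≠ some none := by
  simp only [pvFields, List.mem_cons, List.not_mem_nil, or_false] at hf
  rcases hf with rfl | rfl | rfl | rfl | rfl | rfl | rfl
  · show ((PySem.Int.ofStr? v).map (fun n => some ((1920:Int) ≤ n && n ≤ 2002))) ≠ some none
    cases PySem.Int.ofStr? v <;> simp
  · show ((PySem.Int.ofStr? v).map (fun n => some ((2010:Int) ≤ n && n ≤ 2020))) ≠ some none
    cases PySem.Int.ofStr? v <;> simp
  · show ((PySem.Int.ofStr? v).map (fun n => some ((2020:Int) ≤ n && n ≤ 2030))) ≠ some none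
    cases PySem.Int.ofStr? v <;> simp
  · show (match pvHgtRanges.get? (PySem.Str.slice v (some (-2)) none) with
      | none => some (some false)
      | some (lo, hi) =>
          (PySem.Int.ofStr? (PySem.Str.slice v none (some (-2)))).map
            (fun n => some (lo ≤ n && n ≤ hi))) ≠ some none
    cases pvHgtRanges.get? (PySem.Str.slice v (some (-2)) none) with
    | none => simp
    | some p =>
      obtain ⟨lo, hi⟩ := p
      cases PySem.Int.ofStr? (PySem.Str.slice v none (some (-2))) <;> simp
  · simp [pvFieldCheck]
  · simp [pvFieldCheck]
  · simp [pvFieldCheck]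

-- a non-field key is skipped by the loop body
theorem pv_fieldCheck_of_not_mem (k : String) (hk : k ∉ pvFields) (v : String) :
    pvFieldCheck k v = some none := by
  simp only [pvFields, List.mem_cons, List.not_mem_nil, or_false, not_or] at hk
  obtain ⟨h1, h2, h3, h4, h5, h6, h7⟩ := hk
  simp [pvFieldCheck, h1, h2, h3, h4, h5, h6, h7]

-- bridges: A's validator accepts iff B's field rule accepts
theorem pv_bridge_byr (v : String) :
    pvVByr v = some true ↔ pvFieldCheck "byr" v = some (some true) := by
  show _ ↔ ((PySem.Int.ofStr? v).map (fun n => some ((1920:Int) ≤ n && n ≤ 2002)))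
    = some (some true)
  unfold pvVByr
  cases PySem.Int.ofStr? v <;> simp

theorem pv_bridge_iyr (v : String) :
    pvVIyr v = some true ↔ pvFieldCheck "iyr" v = some (some true) := by
  show _ ↔ ((PySem.Int.ofStr? v).map (fun n => some ((2010:Int) ≤ n && n ≤ 2020)))
    = some (some true)
  unfold pvVIyr
  cases PySem.Int.ofStr? v <;> simp

theorem pv_bridge_eyr (v : String) :
    pvVEyr v = some true ↔ pvFieldCheck "eyr" v = some (some true) := by
  show _ ↔ ((PySem.Int.ofStr? v).map (fun n => some ((2020:Int) ≤ n && n ≤ 2030)))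
    = some (some true)
  unfold pvVEyr
  cases PySem.Int.ofStr? v <;> simp

theorem pv_bridge_hgt (v : String) :
    pvVHgt v = some true ↔ pvFieldCheck "hgt" v = some (some true) := by
  show _ ↔ (match pvHgtRanges.get? (PySem.Str.slice v (some (-2)) none) with
      | none => some (some false)
      | some (lo, hi) =>
          (PySem.Int.ofStr? (PySem.Str.slice v none (some (-2)))).map
            (fun n => some (lo ≤ n && n ≤ hi))) = some (some true)
  unfold pvVHgt
  by_cases hcm : PySem.Str.slice v (some (-2)) none = "cm"
  · rw [hcm]
    show _ ↔ ((PySem.Int.ofStr? (PySem.Str.slice v none (some (-2)))).map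
      (fun n => some ((150:Int) ≤ n && n ≤ 193))) = some (some true)
    cases h : PySem.Int.ofStr? (PySem.Str.slice v none (some (-2))) <;> simp
  · by_cases hin : PySem.Str.slice v (some (-2)) none = "in"
    · rw [hin]
      show _ ↔ ((PySem.Int.ofStr? (PySem.Str.slice v none (some (-2)))).map
        (fun n => some ((59:Int) ≤ n && n ≤ 76))) = some (some true)
      cases h : PySem.Int.ofStr? (PySem.Str.slice v none (some (-2))) <;> simp
    · have hg : pvHgtRanges.get? (PySem.Str.slice v (some (-2)) none) = none := by
        simp [pvHgtRanges, PySem.Dict.get?,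
          beq_eq_false_iff_ne.mpr (Ne.symm hcm), beq_eq_false_iff_ne.mpr (Ne.symm hin)]
      rw [hg]
      simp [beq_eq_false_iff_ne.mpr hcm, beq_eq_false_iff_ne.mpr hin]

theorem pv_bridge_hcl (v : String) :
    pvVHcl v = some true ↔ pvFieldCheck "hcl" v = some (some true) := by
  show _ ↔ some (some (v.toList.length == 7 && PySem.Str.pyGet? v 0 == some '#' &&
      (PySem.Str.slice v (some 1) none).toList.all
        (fun x => "0123456789abcdef".toList.contains x))) = some (some true)
  unfold pvVHcl
  cases hg : PySem.Str.pyGet? v 0 with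
  | none => simp
  | some c =>
    generalize (PySem.Str.slice v (some 1) none).toList.all
        (fun x => "0123456789abcdef".toList.contains x) = hex
    generalize v.toList.length = L
    simp only [Option.bind_some, Option.some.injEq, Bool.and_eq_true, beq_iff_eq]
    tauto

theorem pv_bridge_ecl (v : String) :
    pvVEcl v = some true ↔ pvFieldCheck "ecl" v = some (some true) := by
  show _ ↔ some (some (["amb", "blu", "brn", "gry", "grn", "hzl", "oth"].contains v))
    = some (some true)
  unfold pvVEcl
  simp

theorem pv_bridge_pid (v : String) :
    pvVPid v = some true ↔ pvFieldCheck "pid" v = some (some true) := by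
  show _ ↔ some (some (v.toList.length == 9 &&
      v.toList.all (fun x => "0123456789".toList.contains x))) = some (some true)
  unfold pvVPid
  simp

-- characterisation of B's loop
theorem pv_loop_iff (items : List (String × String)) (acc : PySem.Set String) :
    pvLoop items acc = some true ↔
      ((∀ p ∈ items, pvFieldCheck p.1 p.2 ≠ none ∧ pvFieldCheck p.1 p.2 ≠ some (some false)) ∧
       ∀ f ∈ pvFields, f ∈ acc ∨ ∃ v, (f, v) ∈ items) := by
  induction items generalizing acc with
  | nil =>
    simp [pvLoop, PySem.Set.issuperset_iff, PySem.Set.mem_ofList]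
  | cons hd tl ih =>
    obtain ⟨k, v⟩ := hd
    cases hfc : pvFieldCheck k v with
    | none => simp [pvLoop, hfc]
    | some o =>
      cases o with
      | none =>
        have hk : k ∉ pvFields := fun hmem => pv_fieldCheck_ne_some_none k hmem v hfc
        simp only [pvLoop, hfc, ih, List.forall_mem_cons]
        constructor
        · rintro ⟨hgood, hcov⟩
          refine ⟨⟨by simp, hgood⟩, fun f hf => ?_⟩
          rcases hcov f hf with h | ⟨w, hw⟩
          · exact Or.inl h
          · exact Or.inr ⟨w, List.mem_cons_of_mem _ hw⟩
        · rintro ⟨⟨-, hgood⟩, hcov⟩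
          refine ⟨hgood, fun f hf => ?_⟩
          rcases hcov f hf with h | ⟨w, hw⟩
          · exact Or.inl h
          · rcases List.mem_cons.mp hw with heq | hmem
            · cases heq; exact absurd hf hk
            · exact Or.inr ⟨w, hmem⟩
      | some ok =>
        cases ok with
        | false => simp [pvLoop, hfc]
        | true =>
          simp only [pvLoop, hfc, if_true, ih, List.forall_mem_cons]
          constructor
          · rintro ⟨hgood, hcov⟩
            refine ⟨⟨by simp, hgood⟩, fun f hf => ?_⟩
            rcases hcov f hf with h | ⟨w, hw⟩
            · rcases (PySem.Set.mem_add acc k f).mp h with h' | rfl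
              · exact Or.inl h'
              · exact Or.inr ⟨v, List.mem_cons_self ..⟩
            · exact Or.inr ⟨w, List.mem_cons_of_mem _ hw⟩
          · rintro ⟨⟨-, hgood⟩, hcov⟩
            refine ⟨hgood, fun f hf => ?_⟩
            rcases hcov f hf with h | ⟨w, hw⟩
            · exact Or.inl ((PySem.Set.mem_add acc k f).mpr (Or.inl h))
            · rcases List.mem_cons.mp hw with heq | hmem
              · cases heq; exact Or.inl ((PySem.Set.mem_add acc k k).mpr (Or.inr rfl))
              · exact Or.inr ⟨w, hmem⟩

theorem pv_equiv (s : List (String × String)) (hnd : (s.map Prod.fst).Nodup) :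
    check_with_values s = check_with_values_alt s := by
  have hkeys : (PySem.Dict.mk s).keys.Nodup := by
    simpa [PySem.Dict.keys_mk] using hnd
  have hmem : ∀ (f v : String), (PySem.Dict.mk s).get? f = some v ↔ (f, v) ∈ s :=
    fun f v => PySem.Dict.get?_eq_some_iff_mem_items _ f v hkeys
  have huniq : ∀ {k v v' : String}, (k, v) ∈ s → (k, v') ∈ s → v = v' := by
    intro k v v' h1 h2
    have e1 := (hmem k v).mpr h1
    have e2 := (hmem k v').mpr h2
    rw [e1] at e2
    exact Option.some.inj e2
  have hfields : ∀ f ∈ pvFields, ∃ g, (f, g) ∈ pvValidators ∧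
      (∀ v, g v = some true ↔ pvFieldCheck f v = some (some true)) := by
    intro f hf
    simp only [pvFields, List.mem_cons, List.not_mem_nil, or_false] at hf
    rcases hf with rfl | rfl | rfl | rfl | rfl | rfl | rfl
    · exact ⟨pvVByr, by simp [pvValidators], pv_bridge_byr⟩
    · exact ⟨pvVIyr, by simp [pvValidators], pv_bridge_iyr⟩
    · exact ⟨pvVEyr, by simp [pvValidators], pv_bridge_eyr⟩
    · exact ⟨pvVHgt, by simp [pvValidators], pv_bridge_hgt⟩
    · exact ⟨pvVHcl, by simp [pvValidators], pv_bridge_hcl⟩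
    · exact ⟨pvVEcl, by simp [pvValidators], pv_bridge_ecl⟩
    · exact ⟨pvVPid, by simp [pvValidators], pv_bridge_pid⟩
  have hvals : ∀ p ∈ pvValidators, p.1 ∈ pvFields ∧
      (∀ v, p.2 v = some true ↔ pvFieldCheck p.1 v = some (some true)) := by
    intro p hp
    simp only [pvValidators, List.mem_cons, List.not_mem_nil, or_false] at hp
    rcases hp with rfl | rfl | rfl | rfl | rfl | rfl | rfl
    · exact ⟨by simp [pvFields], pv_bridge_byr⟩
    · exact ⟨by simp [pvFields], pv_bridge_iyr⟩
    · exact ⟨by simp [pvFields], pv_bridge_eyr⟩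
    · exact ⟨by simp [pvFields], pv_bridge_hgt⟩
    · exact ⟨by simp [pvFields], pv_bridge_hcl⟩
    · exact ⟨by simp [pvFields], pv_bridge_ecl⟩
    · exact ⟨by simp [pvFields], pv_bridge_pid⟩
  have hiff : pvAllValid s pvValidators = some true ↔ pvLoop s PySem.Set.empty = some true := by
    rw [pv_allValid_iff, pv_loop_iff]
    constructor
    · intro hP
      constructor
      · rintro ⟨k, v⟩ hkv
        by_cases hk : k ∈ pvFields
        · obtain ⟨g, hg, hgv⟩ := hfields k hk
          obtain ⟨w, hw, hgw⟩ := hP _ hg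
          have hwv : w = v := huniq ((hmem k w).mp hw) hkv
          have hvt : pvFieldCheck k v = some (some true) := (hgv v).mp (hwv ▸ hgw)
          exact ⟨by simp [hvt], by simp [hvt]⟩
        · have hsn := pv_fieldCheck_of_not_mem k hk v
          exact ⟨by simp [hsn], by simp [hsn]⟩
      · intro f hf
        obtain ⟨g, hg, -⟩ := hfields f hf
        obtain ⟨v, hv, -⟩ := hP _ hg
        exact Or.inr ⟨v, (hmem f v).mp hv⟩
    · rintro ⟨hgood, hcov⟩ p hp
      obtain ⟨hf, hbr⟩ := hvals p hp
      rcases hcov p.1 hf with h | ⟨v, hv⟩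
      · exact absurd h (List.not_mem_nil)
      · obtain ⟨hne1, hne2⟩ := hgood (p.1, v) hv
        have hne3 := pv_fieldCheck_ne_some_none p.1 hf v
        have hvt : pvFieldCheck p.1 v = some (some true) := by
          cases hc : pvFieldCheck p.1 v with
          | none => exact absurd hc hne1
          | some o =>
            cases o with
            | none => exact absurd hc hne3
            | some b =>
              cases b with
              | false => exact absurd hc hne2
              | true => rfl
        exact ⟨v, (hmem p.1 v).mpr hv, (hbr v).mpr hvt⟩
  rw [pv_seq]
  unfold check_with_values_alt
  cases hA : pvAllValid s pvValidators with
  | none =>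
    cases hB : pvLoop s PySem.Set.empty with
    | none => rfl
    | some b =>
      cases b with
      | false => rfl
      | true => exact absurd ((hiff).mpr hB) (by simp [hA])
  | some a =>
    cases a with
    | false =>
      cases hB : pvLoop s PySem.Set.empty with
      | none => rfl
      | some b =>
        cases b with
        | false => rfl
        | true => exact absurd ((hiff).mpr hB) (by simp [hA])
    | true =>
      have hB := (hiff).mp hA
      rw [hB]

-- ===== VERDICT (by name: the statement is the Claim_ definition above) =====
theorem check_with_values_spec : Claim_equal_check_with_values := by
  intro s _ hpre
  show check_with_values s = check_with_values_alt s
  exact pv_equiv s hpre
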